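-- pv_equiv track=rewrite | github.com/YashB63/GFG-Daily-Questions | Day 600/Help Ishaan/help_ishaan.py | NthTerm
-- ===== SOURCE A (Python) =====
-- def isPrime(N):
--     if N < 2:
--         return False
--     i = 2
--     while i * i <= N:
--         if N % i == 0:
--             return False
--         i += 1
--     return True
--
-- def NthTerm(N):
--     x = N
--     y = N
--     while x > 1:
--         if isPrime(x):
--             break
--         x -= 1
--     while True:
--         if isPrime(y):
--             break
--         y += 1
--     if not isPrime(x):
--         return y - N
--     return min(abs(N - x),
--                abs(N - y))
-- ===== SOURCE B (Python) =====
-- def isPrime(N):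
--     if N < 2:
--         return False
--     i = 2
--     while i * i <= N:
--         if N % i == 0:
--             return False
--         i += 1
--     return True
--
-- def NthTerm(N):
--     d = 0
--     while True:
--         if isPrime(N - d) or isPrime(N + d):
--             return d
--         d += 1
-- ===== Notes on version B (the rewrite author's own statement) =====
-- stated objective: alternative
-- what changed: Replaces A's two separate scans (downward to the previous prime, upward to the next prime) followed by a guard and a min of two absolute differences with a single symmetric outward scan over the distance d that returns as soon as N-d or N+d is prime.
import Mathlib
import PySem

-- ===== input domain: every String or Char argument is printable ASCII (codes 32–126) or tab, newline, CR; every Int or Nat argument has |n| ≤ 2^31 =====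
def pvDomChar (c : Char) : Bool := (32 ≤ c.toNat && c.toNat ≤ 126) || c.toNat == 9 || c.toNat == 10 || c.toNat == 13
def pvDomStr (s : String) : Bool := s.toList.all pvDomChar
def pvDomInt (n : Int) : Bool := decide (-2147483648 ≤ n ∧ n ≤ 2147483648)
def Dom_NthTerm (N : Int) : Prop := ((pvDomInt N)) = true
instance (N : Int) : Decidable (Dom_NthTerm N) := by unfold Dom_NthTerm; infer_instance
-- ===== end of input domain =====

-- B merges A's two scans into one symmetric outward scan over the distance; return value only, no mutation.

-- ===== PORT A =====
-- trial-division loop of isPrime; fuel N.toNat+1 exceeds the ≤ N-1 possible iterations, so the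
-- fuel-0 fallback (the post-loop 'return True') is never the deciding branch on any Int input
def isPrimeLoop (N : Int) : Int → Nat → Bool
  | _, 0 => true
  | i, f + 1 =>
    if i * i ≤ N then
      if PySem.Int.mod N i = 0 then false else isPrimeLoop N (i + 1) f
    else true

def isPrime (N : Int) : Bool :=
  if N < 2 then false else isPrimeLoop N 2 (N.toNat + 1)

-- 'while x > 1: if isPrime(x): break; x -= 1' — fuel N.toNat+1 exceeds the ≤ N-1 iterations
def downLoop : Int → Nat → Int
  | x, 0 => x
  | x, f + 1 => if x > 1 then (if isPrime x then x else downLoop (x - 1) f) else x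

-- 'while True: if isPrime(y): break; y += 1' — the fuel covers reaching 2 (for N ≤ 2) and then
-- the next prime, which by Bertrand's postulate lies below 2*N; the fuel-0 fallback is unreachable
def upLoop : Int → Nat → Int
  | y, 0 => y
  | y, f + 1 => if isPrime y then y else upLoop (y + 1) f

def upFuel (N : Int) : Nat := (2 - N).toNat + 2 * N.toNat + 4

def NthTerm (N : Int) : Int :=
  let x := downLoop N (N.toNat + 1)
  let y := upLoop N (upFuel N)
  if ¬ isPrime x then y - N
  else min |N - x| |N - y|

-- ===== PORT B =====
-- 'd = 0; while True: if isPrime(N-d) or isPrime(N+d): return d; d += 1' — same fuel bound as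
-- A's upward loop (the loop fires no later than at the next prime above N); fallback unreachable
def bLoop (N : Int) : Int → Nat → Int
  | d, 0 => d
  | d, f + 1 => if isPrime (N - d) || isPrime (N + d) then d else bLoop N (d + 1) f

def NthTerm_alt (N : Int) : Int := bLoop N 0 (upFuel N)

-- ===== PRECONDITION & SPEC =====
def Spec_NthTerm (N : Int) (out : Int) : Prop := out = NthTerm_alt N
instance (N : Int) (out : Int) : Decidable (Spec_NthTerm N out) := by unfold Spec_NthTerm; infer_instance

-- ===== CLAIM (what is proved, stated in full; the proofs are below) =====
def Claim_equal_NthTerm : Prop := ∀ (N : Int), Dom_NthTerm N → Spec_NthTerm N (NthTerm N)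

-- ===== LEMMAS AND PROOFS =====

theorem isPrime_lt_two {m : Int} (h : m < 2) : isPrime m = false := by
  simp [isPrime, h]

theorem isPrimeLoop_true {p : ℕ} (hp : Nat.Prime p) :
    ∀ (f : Nat) (i : Int), 2 ≤ i → isPrimeLoop (p : Int) i f = true := by
  intro f
  induction f with
  | zero => intro i _; rfl
  | succ f ih =>
    intro i hi
    simp only [isPrimeLoop]
    split_ifs with h1 h2
    · exfalso
      rw [PySem.Int.mod_eq_zero_iff_dvd] at h2
      have hipos : 0 < i := by omega
      have hd : i.toNat ∣ p := by
        rcases h2 with ⟨c, hc⟩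
        have hcpos : 0 ≤ c := by nlinarith [Int.natCast_nonneg p]
        refine ⟨c.toNat, ?_⟩
        have hcast : (p : Int) = ((i.toNat : Int)) * ((c.toNat : Int)) := by
          rw [Int.toNat_of_nonneg (by omega : (0:Int) ≤ i), Int.toNat_of_nonneg hcpos]
          exact hc
        exact_mod_cast hcast
      have := (Nat.Prime.eq_one_or_self_of_dvd hp _ hd)
      have hlt : i < (p : Int) := by nlinarith
      omega
    · exact ih (i + 1) (by omega)
    · rfl

theorem isPrime_of_prime {p : ℕ} (hp : Nat.Prime p) : isPrime (p : Int) = true := by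
  have h2 : 2 ≤ p := hp.two_le
  simp only [isPrime]
  rw [if_neg (by exact_mod_cast not_lt.mpr (by exact_mod_cast h2))]
  exact isPrimeLoop_true hp _ 2 (by omega)

-- a prime lies within upFuel N steps above N
theorem exists_up (N : Int) :
    ∃ k : Nat, k < upFuel N ∧ isPrime (N + k) = true := by
  by_cases hN : N ≤ 2
  · refine ⟨(2 - N).toNat, ?_, ?_⟩
    · simp [upFuel]; omega
    · have : N + ((2 - N).toNat : Int) = ((2 : ℕ) : Int) := by omega
      rw [this]; exact isPrime_of_prime Nat.prime_two
  · obtain ⟨p, hp, h1, h2⟩ := Nat.exists_prime_lt_and_le_two_mul N.toNat (by omega)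
    refine ⟨p - N.toNat, ?_, ?_⟩
    · simp [upFuel]; omega
    · have : N + ((p - N.toNat : ℕ) : Int) = (p : Int) := by omega
      rw [this]; exact isPrime_of_prime hp

theorem upLoop_spec : ∀ (f : Nat) (y : Int),
    (∃ k : Nat, k < f ∧ isPrime (y + k) = true) →
    isPrime (upLoop y f) = true ∧ y ≤ upLoop y f ∧
      ∀ m, y ≤ m → m < upLoop y f → isPrime m = false := by
  intro f
  induction f with
  | zero => rintro y ⟨k, hk, _⟩; omega
  | succ f ih =>
    rintro y ⟨k, hk, hkp⟩
    by_cases hy : isPrime y = true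
    · have hstep : upLoop y (f + 1) = y := by simp [upLoop, hy]
      rw [hstep]
      exact ⟨hy, le_refl _, fun m h1 h2 => by omega⟩
    · have hy' : isPrime y = false := by simpa using hy
      have hk0 : k ≠ 0 := by rintro rfl; simp at hkp; exact hy hkp
      have ⟨hA, hB, hC⟩ := ih (y + 1) ⟨k - 1, by omega, by
        have : y + 1 + ((k - 1 : ℕ) : Int) = y + k := by omega
        rw [this]; exact hkp⟩
      have hstep : upLoop y (f + 1) = upLoop (y + 1) f := by simp [upLoop, hy']
      rw [hstep]
      refine ⟨hA, by omega, fun m h1 h2 => ?_⟩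
      rcases eq_or_lt_of_le h1 with h | h
      · subst h; exact hy'
      · exact hC m (by omega) h2

theorem downLoop_spec : ∀ (f : Nat) (x : Int), (x ≤ (f : Int) + 1) →
    (downLoop x f ≤ x ∧
     (∀ m, downLoop x f < m → m ≤ x → isPrime m = false) ∧
     (isPrime (downLoop x f) = true ∨ downLoop x f ≤ 1)) := by
  intro f
  induction f with
  | zero =>
    intro x hx
    simp only [downLoop]
    refine ⟨le_refl _, fun m h1 h2 => by omega, Or.inr (by omega)⟩
  | succ f ih =>
    intro x hx
    by_cases h1 : x > 1
    · by_cases h2 : isPrime x = true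
      · have hstep : downLoop x (f + 1) = x := by simp [downLoop, h1, h2]
        rw [hstep]
        exact ⟨le_refl _, fun m ha hb => by omega, Or.inl h2⟩
      · have h2' : isPrime x = false := by simpa using h2
        have ⟨hA, hB, hC⟩ := ih (x - 1) (by omega)
        have hstep : downLoop x (f + 1) = downLoop (x - 1) f := by
          simp [downLoop, h1, h2']
        rw [hstep]
        refine ⟨by omega, fun m ha hb => ?_, hC⟩
        rcases eq_or_lt_of_le hb with h | h
        · subst h; exact h2'
        · exact hB m ha (by omega)
    · have hstep : downLoop x (f + 1) = x := by simp [downLoop, h1]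
      rw [hstep]
      exact ⟨le_refl _, fun m ha hb => by omega, Or.inr (by omega)⟩

theorem bLoop_spec : ∀ (f : Nat) (N d : Int),
    (∃ k : Nat, k < f ∧ isPrime (N + (d + k)) = true) →
    ((isPrime (N - bLoop N d f) = true ∨ isPrime (N + bLoop N d f) = true) ∧
     d ≤ bLoop N d f ∧
     ∀ e, d ≤ e → e < bLoop N d f → isPrime (N - e) = false ∧ isPrime (N + e) = false) := by
  intro f
  induction f with
  | zero => rintro N d ⟨k, hk, _⟩; omega
  | succ f ih =>
    rintro N d ⟨k, hk, hkp⟩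
    by_cases hd : (isPrime (N - d) || isPrime (N + d)) = true
    · have hstep : bLoop N d (f + 1) = d := by simp [bLoop, hd]
      rw [hstep]
      refine ⟨by simpa using hd, le_refl _, fun e h1 h2 => by omega⟩
    · simp only [Bool.or_eq_true, not_or, Bool.not_eq_true] at hd
      have hk0 : k ≠ 0 := by
        rintro rfl
        simp only [Nat.cast_zero, add_zero] at hkp
        rw [hd.2] at hkp; exact absurd hkp (by simp)
      have ⟨hA, hB, hC⟩ := ih N (d + 1) ⟨k - 1, by omega, by
        have : N + (d + 1 + ((k - 1 : ℕ) : Int)) = N + (d + k) := by omega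
        rw [this]; exact hkp⟩
      have hstep : bLoop N d (f + 1) = bLoop N (d + 1) f := by
        simp [bLoop, hd.1, hd.2]
      rw [hstep]
      refine ⟨hA, by omega, fun e h1 h2 => ?_⟩
      rcases eq_or_lt_of_le h1 with h | h
      · subst h; exact hd
      · exact hC e (by omega) h2

-- ===== VERDICT (by name: the statement is the Claim_ definition above) =====
theorem NthTerm_spec : Claim_equal_NthTerm := by
  intro N _
  unfold Spec_NthTerm
  show NthTerm N = NthTerm_alt N
  simp only [NthTerm, NthTerm_alt]
  obtain ⟨ku, hku, hkup⟩ := exists_up N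
  obtain ⟨hyP, hyGe, hyMin⟩ := upLoop_spec (upFuel N) N ⟨ku, hku, hkup⟩
  obtain ⟨hxLe, hxMax, hxP⟩ := downLoop_spec (N.toNat + 1) N (by push_cast; omega)
  obtain ⟨hbP, hbGe, hbMin⟩ := bLoop_spec (upFuel N) N 0 ⟨ku, hku, by simpa using hkup⟩
  set x := downLoop N (N.toNat + 1) with hx
  set y := upLoop N (upFuel N) with hy
  set r := bLoop N 0 (upFuel N) with hr
  -- dA: the value A returns
  by_cases hPx : isPrime x = true
  · -- A returns min (N - x) (y - N); x ≥ 2 so N ≥ 2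
    have hx2 : 2 ≤ x := by
      by_contra h
      exact absurd hPx (by simp [isPrime_lt_two (by omega : x < 2)])
    rw [if_neg (by simp [hPx])]
    have habs1 : |N - x| = N - x := abs_of_nonneg (by omega)
    have habs2 : |N - y| = y - N := by rw [abs_of_nonpos (by omega)]; ring
    rw [habs1, habs2]
    set dA := min (N - x) (y - N) with hdA
    -- dA satisfies the predicate; r is the least such; show r = dA
    have hdAsat : isPrime (N - dA) = true ∨ isPrime (N + dA) = true := by
      rcases min_cases (N - x) (y - N) with ⟨he, _⟩ | ⟨he, _⟩
      · left; rw [hdA, he]; have : N - (N - x) = x := by ring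
        rw [this]; exact hPx
      · right; rw [hdA, he]; have : N + (y - N) = y := by ring
        rw [this]; exact hyP
    have hdAmin : ∀ e, 0 ≤ e → e < dA → isPrime (N - e) = false ∧ isPrime (N + e) = false := by
      intro e h0 he
      constructor
      · exact hxMax (N - e) (by omega) (by omega)
      · exact hyMin (N + e) (by omega) (by omega)
    -- r ≤ dA
    have h1 : r ≤ dA := by
      by_contra h
      have := hbMin dA (by omega) (by omega)
      rcases hdAsat with hs | hs
      · rw [this.1] at hs; exact absurd hs (by simp)
      · rw [this.2] at hs; exact absurd hs (by simp)
    have h2 : dA ≤ r := by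
      by_contra h
      have := hdAmin r hbGe (by omega)
      rcases hbP with hs | hs
      · rw [this.1] at hs; exact absurd hs (by simp)
      · rw [this.2] at hs; exact absurd hs (by simp)
    omega
  · -- A returns y - N; no prime in [2, N], so B scans only upward
    rw [if_pos hPx]
    have hxFail : ∀ m, m ≤ N → isPrime m = false := by
      intro m hm
      by_cases hm1 : m < 2
      · exact isPrime_lt_two hm1
      · rcases hxP with h | h
        · exact absurd h hPx
        · exact hxMax m (by omega) hm
    have hsat : isPrime (N - (y - N)) = true ∨ isPrime (N + (y - N)) = true := by
      right; have : N + (y - N) = y := by ring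
      rw [this]; exact hyP
    have hmin : ∀ e, 0 ≤ e → e < y - N → isPrime (N - e) = false ∧ isPrime (N + e) = false := by
      intro e h0 he
      exact ⟨hxFail (N - e) (by omega), hyMin (N + e) (by omega) (by omega)⟩
    have h1 : r ≤ y - N := by
      by_contra h
      have := hbMin (y - N) (by omega) (by omega)
      rcases hsat with hs | hs
      · rw [this.1] at hs; exact absurd hs (by simp)
      · rw [this.2] at hs; exact absurd hs (by simp)
    have h2 : y - N ≤ r := by
      by_contra h
      have := hmin r hbGe (by omega)
      rcases hbP with hs | hs
      · rw [this.1] at hs; exact absurd hs (by simp)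
      · rw [this.2] at hs; exact absurd hs (by simp)
    omega
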